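-- pv_equiv track=rewrite | github.com/vs-devan/webifyai | ai_generation/main.py | _batch_files_by_type
-- ===== SOURCE A (Python) =====
-- from typing import Dict, Optional, List
--
-- def _batch_files_by_type(files: List[Dict], batch_size: int = 5) -> List[List[Dict]]:
--     """Original type-based batching as fallback."""
--     # Group by type first
--     groups = {'frontend': [], 'backend': [], 'config': [], 'other': []}
--
--     for f in files:
--         path_lower = f['path'].lower()
--         file_type = f.get('type', 'other')
--
--         # Map unexpected types to expected ones
--         if file_type == 'documentation':
--             file_type = 'config'
--         elif file_type == 'styles':
--             file_type = 'frontend'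
--
--         if file_type in groups:
--             groups[file_type].append(f)
--         elif 'src/' in path_lower or 'components/' in path_lower or path_lower.endswith(('.js', '.jsx', '.css')):
--             groups['frontend'].append(f)
--         elif 'models/' in path_lower or 'routes/' in path_lower or 'server.js' in path_lower:
--             groups['backend'].append(f)
--         elif path_lower in ['package.json', '.env', '.gitignore', 'readme.md']:
--             groups['config'].append(f)
--         else:
--             groups['other'].append(f)
--
--     # Create batches from groups
--     batches = []
--     for group in groups.values():
--         for i in range(0, len(group), batch_size):
--             batch = group[i:i+batch_size]
--             if batch:
--                 batches.append(batch)
--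
--     return batches
-- ===== SOURCE B (Python) =====
-- from typing import Dict, List
--
--
-- def _batch_files_by_type(files: List[Dict], batch_size: int = 5) -> List[List[Dict]]:
--     """Single-pass batching: classify each file and grow its group's open batch,
--     closing a batch as soon as it reaches batch_size; no second slicing pass."""
--
--     def _classify(f):
--         # 0 = frontend, 1 = backend, 2 = config, 3 = other
--         p = f['path'].lower()
--         t = f.get('type', 'other')
--         if t == 'documentation':
--             t = 'config'
--         elif t == 'styles':
--             t = 'frontend'
--         if t == 'frontend':
--             return 0
--         if t == 'backend':
--             return 1
--         if t == 'config':
--             return 2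
--         if t == 'other':
--             return 3
--         if 'src/' in p or 'components/' in p or p.endswith(('.js', '.jsx', '.css')):
--             return 0
--         if 'models/' in p or 'routes/' in p or 'server.js' in p:
--             return 1
--         if p in ('package.json', '.env', '.gitignore', 'readme.md'):
--             return 2
--         return 3
--
--     # per group: (completed batches, current open batch)
--     state = [([], []), ([], []), ([], []), ([], [])]
--     for f in files:
--         k = _classify(f)
--         done, cur = state[k]
--         cur = cur + [f]
--         if len(cur) == batch_size:
--             done, cur = done + [cur], []
--         state[k] = (done, cur)
--
--     out = []
--     for done, cur in state:
--         out += done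
--         if cur:
--             out.append(cur)
--     return out
-- ===== Notes on version B (the rewrite author's own statement) =====
-- stated objective: alternative
-- what changed: B folds batching into the single classification pass (each of the four groups keeps a list of completed batches plus an open batch that is closed when it reaches batch_size), replacing A's two-phase group-then-slice structure; classification branches are unchanged.
-- intended difference: For batch_size < 0 with nonempty files, A silently returns [] (an artefact of range()'s empty result on a negative step, dropping every file), while B returns each nonempty group as a single batch, which preserves the files as intended. — e.g. on _batch_files_by_type([[("path", "a")]], -1): A returns [], B returns [[[("path", "a")]]]
import Mathlib
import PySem

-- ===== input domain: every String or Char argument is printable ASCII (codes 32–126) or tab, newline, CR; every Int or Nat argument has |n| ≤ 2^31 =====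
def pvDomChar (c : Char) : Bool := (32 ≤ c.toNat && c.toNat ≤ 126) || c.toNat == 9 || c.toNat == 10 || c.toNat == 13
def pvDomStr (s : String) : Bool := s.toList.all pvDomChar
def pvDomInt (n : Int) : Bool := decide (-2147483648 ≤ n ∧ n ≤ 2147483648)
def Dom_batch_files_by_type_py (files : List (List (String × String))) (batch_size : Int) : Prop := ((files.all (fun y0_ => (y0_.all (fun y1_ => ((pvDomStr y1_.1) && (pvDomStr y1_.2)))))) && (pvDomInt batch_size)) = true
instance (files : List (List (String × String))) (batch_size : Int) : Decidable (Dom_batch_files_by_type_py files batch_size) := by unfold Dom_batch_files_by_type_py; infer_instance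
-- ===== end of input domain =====

-- B folds batching into the single classification pass (per group: completed batches + an open
-- batch closed at batch_size), replacing A's group-then-slice two-phase structure.
-- Return-value equivalence only; neither program mutates its arguments.

-- ===== PORT A =====
-- the groups dict with its four fixed keys is ported as a 4-tuple (frontend, backend, config, other)
def pvStepA (g : List (List (String × String)) × List (List (String × String)) × List (List (String × String)) × List (List (String × String))) (f : List (String × String)) :
    List (List (String × String)) × List (List (String × String)) × List (List (String × String)) × List (List (String × String)) :=
  let path_lower := PySem.Str.lower ((PySem.Dict.mk f).getD "path" "")  -- f['path']; Pre_ guarantees the key is present (KeyError otherwise)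
  let ft0 := (PySem.Dict.mk f).getD "type" "other"
  let file_type := if ft0 == "documentation" then "config" else if ft0 == "styles" then "frontend" else ft0
  if file_type == "frontend" then (g.1 ++ [f], g.2.1, g.2.2.1, g.2.2.2)
  else if file_type == "backend" then (g.1, g.2.1 ++ [f], g.2.2.1, g.2.2.2)
  else if file_type == "config" then (g.1, g.2.1, g.2.2.1 ++ [f], g.2.2.2)
  else if file_type == "other" then (g.1, g.2.1, g.2.2.1, g.2.2.2 ++ [f])
  else if PySem.Str.isIn "src/" path_lower || PySem.Str.isIn "components/" path_lower
        || PySem.Str.endswith path_lower ".js" || PySem.Str.endswith path_lower ".jsx" || PySem.Str.endswith path_lower ".css" then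
    (g.1 ++ [f], g.2.1, g.2.2.1, g.2.2.2)
  else if PySem.Str.isIn "models/" path_lower || PySem.Str.isIn "routes/" path_lower || PySem.Str.isIn "server.js" path_lower then
    (g.1, g.2.1 ++ [f], g.2.2.1, g.2.2.2)
  else if path_lower == "package.json" || path_lower == ".env" || path_lower == ".gitignore" || path_lower == "readme.md" then
    (g.1, g.2.1, g.2.2.1 ++ [f], g.2.2.2)
  else
    (g.1, g.2.1, g.2.2.1, g.2.2.2 ++ [f])

-- the inner 'for i in range(0, len(group), batch_size)' loop of A
def pvSliceBatches (group : List (List (String × String))) (batch_size : Int) (batches : List (List (List (String × String)))) : List (List (List (String × String))) :=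
  (PySem.List.pyRange 0 (group.length : Int) batch_size).foldl
    (fun acc i =>
      let batch := PySem.List.slice group (some i) (some (i + batch_size))
      if batch = [] then acc else acc ++ [batch]) batches

def batch_files_by_type_py (files : List (List (String × String))) (batch_size : Int) : List (List (List (String × String))) :=
  let groups := files.foldl pvStepA ([], [], [], [])
  [groups.1, groups.2.1, groups.2.2.1, groups.2.2.2].foldl
    (fun batches group => pvSliceBatches group batch_size batches) []

-- ===== PORT B =====
-- helper _classify of Source B: 0 = frontend, 1 = backend, 2 = config, 3 = other
def pvClassify (f : List (String × String)) : Int :=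
  let p := PySem.Str.lower ((PySem.Dict.mk f).getD "path" "")  -- f['path']; Pre_ guarantees the key (KeyError otherwise)
  let t0 := (PySem.Dict.mk f).getD "type" "other"
  let t := if t0 == "documentation" then "config" else if t0 == "styles" then "frontend" else t0
  if t == "frontend" then 0
  else if t == "backend" then 1
  else if t == "config" then 2
  else if t == "other" then 3
  else
    if PySem.Str.isIn "src/" p || PySem.Str.isIn "components/" p
        || PySem.Str.endswith p ".js" || PySem.Str.endswith p ".jsx" || PySem.Str.endswith p ".css" then 0
    else if PySem.Str.isIn "models/" p || PySem.Str.isIn "routes/" p || PySem.Str.isIn "server.js" p then 1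
    else if p == "package.json" || p == ".env" || p == ".gitignore" || p == "readme.md" then 2
    else 3

-- the loop body of Source B: append f to its group's open batch, close it at batch_size
def pvStepB (batch_size : Int)
    (state : List (List (List (List (String × String))) × List (List (String × String))))
    (f : List (String × String)) : List (List (List (List (String × String))) × List (List (String × String))) :=
  let k := pvClassify f
  let dc := PySem.List.pyGetD state k ([], [])
  let cur := dc.2 ++ [f]
  let dc' := if (cur.length : Int) = batch_size then (dc.1 ++ [cur], ([] : List (List (String × String)))) else (dc.1, cur)
  PySem.List.pySetD state k dc'

-- the final 'for done, cur in state' loop of Source B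
def pvCollect (out : List (List (List (String × String))))
    (dc : List (List (List (String × String))) × List (List (String × String))) : List (List (List (String × String))) :=
  let out' := out ++ dc.1
  if dc.2 = [] then out' else out' ++ [dc.2]

def batch_files_by_type_py_alt (files : List (List (String × String))) (batch_size : Int) : List (List (List (String × String))) :=
  let state := files.foldl (pvStepB batch_size) [([], []), ([], []), ([], []), ([], [])]
  state.foldl pvCollect []

-- ===== PRECONDITION & SPEC =====
-- Pre_ excludes exactly the inputs where A raises: batch_size = 0 (range() ValueError) and a file
-- without a 'path' key (KeyError — A reads f['path'] for every file).
def Pre_batch_files_by_type_py (files : List (List (String × String))) (batch_size : Int) : Prop :=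
  batch_size ≠ 0 ∧ ∀ f ∈ files, "path" ∈ f.map Prod.fst
instance (files : List (List (String × String))) (batch_size : Int) : Decidable (Pre_batch_files_by_type_py files batch_size) := by
  unfold Pre_batch_files_by_type_py; infer_instance

def pvWitness_batch_files_by_type_py : (List (List (String × String))) × Int :=
  ([[("path", "src/a.js")], [("path", "x.txt"), ("type", "docs")]], 2)

-- For batch_size < 0 with nonempty files, A silently returns [] (an artefact of range()'s empty
-- result on a negative step, dropping every file), while B returns each nonempty group as a single
-- batch, which preserves the files as intended.
def D_batch_files_by_type_py (files : List (List (String × String))) (batch_size : Int) : Prop :=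
  batch_size < 0 ∧ files ≠ []
instance (files : List (List (String × String))) (batch_size : Int) : Decidable (D_batch_files_by_type_py files batch_size) := by
  unfold D_batch_files_by_type_py; infer_instance

def Spec_batch_files_by_type_py (files : List (List (String × String))) (batch_size : Int) (out : List (List (List (String × String)))) : Prop :=
  ¬ D_batch_files_by_type_py files batch_size → out = batch_files_by_type_py_alt files batch_size
instance (files : List (List (String × String))) (batch_size : Int) (out : List (List (List (String × String)))) : Decidable (Spec_batch_files_by_type_py files batch_size out) := by
  unfold Spec_batch_files_by_type_py; infer_instance

def pvDiffWitness_batch_files_by_type_py : (List (List (String × String))) × Int := ([[("path", "a")]], -1)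
def pvDiffWitnessOut_batch_files_by_type_py : (List (List (List (String × String)))) × (List (List (List (String × String)))) :=
  ([], [[[("path", "a")]]])

-- ===== CLAIM (what is proved, stated in full; the proofs are below) =====
def Claim_unchanged_batch_files_by_type_py : Prop := ∀ (files : List (List (String × String))) (batch_size : Int), Dom_batch_files_by_type_py files batch_size → Pre_batch_files_by_type_py files batch_size → Spec_batch_files_by_type_py files batch_size (batch_files_by_type_py files batch_size)
def Claim_changed_batch_files_by_type_py : Prop := Dom_batch_files_by_type_py (pvDiffWitness_batch_files_by_type_py.1) (pvDiffWitness_batch_files_by_type_py.2) ∧ Pre_batch_files_by_type_py (pvDiffWitness_batch_files_by_type_py.1) (pvDiffWitness_batch_files_by_type_py.2) ∧ D_batch_files_by_type_py (pvDiffWitness_batch_files_by_type_py.1) (pvDiffWitness_batch_files_by_type_py.2) ∧ batch_files_by_type_py (pvDiffWitness_batch_files_by_type_py.1) (pvDiffWitness_batch_files_by_type_py.2) = pvDiffWitnessOut_batch_files_by_type_py.1 ∧ batch_files_by_type_py_alt (pvDiffWitness_batch_files_by_type_py.1) (pvDiffWitness_batch_files_by_type_py.2) = pvDiffWitnessOut_batch_files_by_type_py.2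 ∧ pvDiffWitnessOut_batch_files_by_type_py.1 ≠ pvDiffWitnessOut_batch_files_by_type_py.2
def Claim_exact_batch_files_by_type_py : Prop := ∀ (files : List (List (String × String))) (batch_size : Int), Dom_batch_files_by_type_py files batch_size → Pre_batch_files_by_type_py files batch_size → D_batch_files_by_type_py files batch_size → batch_files_by_type_py files batch_size ≠ batch_files_by_type_py_alt files batch_size


-- ===== LEMMAS AND PROOFS =====

-- chunks of size bs (proof-side characterisation of both batching phases)
def pvChunks {α : Type} (bs : Nat) (l : List α) : List (List α) :=
  if _hbs : bs = 0 then []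
  else if _h : l = [] then []
  else l.take bs :: pvChunks bs (l.drop bs)
termination_by l.length
decreasing_by
  have := List.length_pos_of_ne_nil _h
  simp [List.length_drop]; omega

theorem pvChunks_nil {α : Type} (bs : Nat) : pvChunks bs ([] : List α) = [] := by
  rw [pvChunks]; simp

theorem pvChunks_cons {α : Type} {bs : Nat} {l : List α} (hbs : bs ≠ 0) (hl : l ≠ []) :
    pvChunks bs l = l.take bs :: pvChunks bs (l.drop bs) := by
  conv_lhs => rw [pvChunks]
  simp [hbs, hl]

theorem pvChunks_short {α : Type} {bs : Nat} {l : List α} (hbs : bs ≠ 0) (hl : l ≠ [])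
    (h : l.length ≤ bs) : pvChunks bs l = [l] := by
  rw [pvChunks_cons hbs hl, List.take_of_length_le h, List.drop_eq_nil_of_le h, pvChunks_nil]

-- the shared 8-leaf decision tree of A's loop body and B's _classify, over its Bool atoms
theorem pvBranch_corr {α : Type} (b1 b2 b3 b4 b5 b6 b7 : Bool) (F B C O : α) :
    (if b1 then F else if b2 then B else if b3 then C else if b4 then O
     else if b5 then F else if b6 then B else if b7 then C else O)
    = (if (if b1 then (0:Int) else if b2 then 1 else if b3 then 2 else if b4 then 3
           else if b5 then 0 else if b6 then 1 else if b7 then 2 else 3) = 0 then F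
       else if (if b1 then (0:Int) else if b2 then 1 else if b3 then 2 else if b4 then 3
           else if b5 then 0 else if b6 then 1 else if b7 then 2 else 3) = 1 then B
       else if (if b1 then (0:Int) else if b2 then 1 else if b3 then 2 else if b4 then 3
           else if b5 then 0 else if b6 then 1 else if b7 then 2 else 3) = 2 then C
       else O) := by
  cases b1 <;> cases b2 <;> cases b3 <;> cases b4 <;> cases b5 <;> cases b6 <;> cases b7 <;> simp

theorem pvBranch_mem (b1 b2 b3 b4 b5 b6 b7 : Bool) :
    (if b1 then (0:Int) else if b2 then 1 else if b3 then 2 else if b4 then 3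
     else if b5 then 0 else if b6 then 1 else if b7 then 2 else 3) = 0 ∨
    (if b1 then (0:Int) else if b2 then 1 else if b3 then 2 else if b4 then 3
     else if b5 then 0 else if b6 then 1 else if b7 then 2 else 3) = 1 ∨
    (if b1 then (0:Int) else if b2 then 1 else if b3 then 2 else if b4 then 3
     else if b5 then 0 else if b6 then 1 else if b7 then 2 else 3) = 2 ∨
    (if b1 then (0:Int) else if b2 then 1 else if b3 then 2 else if b4 then 3
     else if b5 then 0 else if b6 then 1 else if b7 then 2 else 3) = 3 := by
  cases b1 <;> cases b2 <;> cases b3 <;> cases b4 <;> cases b5 <;> cases b6 <;> cases b7 <;> simp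

-- per-file shape of A's classification branches, stated through pvClassify
theorem pvStepA_classify (g : List (List (String × String)) × List (List (String × String)) × List (List (String × String)) × List (List (String × String)))
    (f : List (String × String)) :
    pvStepA g f =
      if pvClassify f = 0 then (g.1 ++ [f], g.2.1, g.2.2.1, g.2.2.2)
      else if pvClassify f = 1 then (g.1, g.2.1 ++ [f], g.2.2.1, g.2.2.2)
      else if pvClassify f = 2 then (g.1, g.2.1, g.2.2.1 ++ [f], g.2.2.2)
      else (g.1, g.2.1, g.2.2.1, g.2.2.2 ++ [f]) := by
  unfold pvStepA pvClassify
  dsimp only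
  exact pvBranch_corr _ _ _ _ _ _ _ _ _ _ _

theorem pvClassify_cases (f : List (String × String)) :
    pvClassify f = 0 ∨ pvClassify f = 1 ∨ pvClassify f = 2 ∨ pvClassify f = 3 := by
  unfold pvClassify
  dsimp only
  exact pvBranch_mem _ _ _ _ _ _ _

-- range(0, n, bs) for positive bs peels its first index
theorem pvRange_shift (bs n : Int) (hbs : 0 < bs) (hn : 0 < n) :
    PySem.List.pyRange 0 n bs = 0 :: (PySem.List.pyRange 0 (n - bs) bs).map (fun i => i + bs) := by
  have hbs' : bs ≠ 0 := hbs.ne'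
  rw [PySem.List.pyRange_of_pos _ _ hbs, PySem.List.pyRange_of_pos _ _ hbs]
  have hcount : (if (0:Int) < n then ((n - 0 + bs - 1) / bs).toNat else 0)
      = (if (0:Int) < n - bs then ((n - bs - 0 + bs - 1) / bs).toNat else 0) + 1 := by
    by_cases h : (0:Int) < n - bs
    · rw [if_pos hn, if_pos h]
      have h1 : n - 0 + bs - 1 = (n - bs - 0 + bs - 1) + 1 * bs := by ring
      rw [h1, Int.add_mul_ediv_right _ _ hbs']
      have h2 : 0 ≤ (n - bs - 0 + bs - 1) / bs := Int.ediv_nonneg (by omega) (by omega)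
      omega
    · rw [if_pos hn, if_neg h]
      have h1 : (n - 0 + bs - 1) / bs = 1 := by
        have e : n - 0 + bs - 1 = (n - 1) + 1 * bs := by ring
        rw [e, Int.add_mul_ediv_right _ _ hbs',
          Int.ediv_eq_zero_of_lt (by omega) (by omega)]
        omega
      rw [h1]
      omega
  rw [hcount, List.range_succ_eq_map]
  simp only [List.map_cons, List.map_map]
  congr 1
  · norm_num
  · apply List.map_congr_left
    intro k _
    simp only [Function.comp_apply]
    push_cast
    ring

-- A's inner slicing loop produces the chunks of the group
theorem pvSliceBatches_eq (bs : Int) (hbs : 1 ≤ bs) :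
    ∀ (n : Nat) (g : List (List (String × String))), g.length = n →
    ∀ acc, pvSliceBatches g bs acc = acc ++ pvChunks bs.toNat g := by
  intro n
  induction n using Nat.strong_induction_on with
  | _ n ih =>
    intro g hlen acc
    rcases eq_or_ne g [] with rfl | hg
    · unfold pvSliceBatches
      rw [PySem.List.pyRange_of_pos _ _ (by omega)]
      simp [pvChunks_nil]
    · have hn : 0 < (g.length : Int) := by
        have := List.length_pos_of_ne_nil hg; exact_mod_cast this
      unfold pvSliceBatches
      rw [pvRange_shift bs _ (by omega) hn, List.foldl_cons]
      have hfirst : PySem.List.slice g (some 0) (some (0 + bs)) = g.take bs.toNat := by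
        rw [PySem.List.slice_toNat _ le_rfl (by omega)]
        simp
      have hne : g.take bs.toNat ≠ [] := by
        simp [List.take_eq_nil_iff]
        exact ⟨by omega, hg⟩
      rw [hfirst, if_neg hne, List.foldl_map]
      have hcongr : List.foldl
            (fun acc (i : Int) =>
              let batch := PySem.List.slice g (some (i + bs)) (some (i + bs + bs))
              if batch = [] then acc else acc ++ [batch])
            (acc ++ [g.take bs.toNat]) (PySem.List.pyRange 0 ((g.length : Int) - bs) bs)
          = List.foldl
            (fun acc (i : Int) =>
              let batch := PySem.List.slice (g.drop bs.toNat) (some i) (some (i + bs))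
              if batch = [] then acc else acc ++ [batch])
            (acc ++ [g.take bs.toNat]) (PySem.List.pyRange 0 ((g.length : Int) - bs) bs) := by
        apply PySem.List.foldl_congr_mem
        intro a i hi
        have hipos : 0 ≤ i := by
          have := (PySem.List.mem_pyRange_iff_of_pos (by omega : (0:Int) < bs) i).mp hi
          omega
        have hslice : PySem.List.slice g (some (i + bs)) (some (i + bs + bs))
            = PySem.List.slice (g.drop bs.toNat) (some i) (some (i + bs)) := by
          rw [PySem.List.slice_toNat _ (by omega) (by omega),
            PySem.List.slice_toNat _ (by omega) (by omega)]
          rw [List.drop_drop]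
          congr 1
          · omega
          · congr 1; omega
        simp only [hslice]
      rw [hcongr]
      by_cases hle : g.length ≤ bs.toNat
      · have hzero : PySem.List.pyRange 0 ((g.length : Int) - bs) bs = [] := by
          rw [PySem.List.pyRange_of_pos _ _ (by omega)]
          rw [if_neg (by omega)]
          simp
        rw [hzero, List.foldl_nil, pvChunks_short (by omega) hg hle,
          List.take_of_length_le hle]
      · have hlen' : (((g.drop bs.toNat).length : Nat) : Int) = (g.length : Int) - bs := by
          simp [List.length_drop]
          omega
        have hih := ih (g.drop bs.toNat).length (by simp [List.length_drop]; omega)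
          (g.drop bs.toNat) rfl (acc ++ [g.take bs.toNat])
        unfold pvSliceBatches at hih
        rw [hlen'] at hih
        rw [hih, pvChunks_cons (by omega) hg]
        simp

-- A's grouping loop computes the four classification filters
theorem pvGroups (files : List (List (String × String))) :
    ∀ g1 g2 g3 g4, files.foldl pvStepA (g1, g2, g3, g4) =
      (g1 ++ files.filter (fun f => pvClassify f == 0),
       g2 ++ files.filter (fun f => pvClassify f == 1),
       g3 ++ files.filter (fun f => pvClassify f == 2),
       g4 ++ files.filter (fun f => pvClassify f == 3)) := by
  induction files with
  | nil => intro g1 g2 g3 g4; simp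
  | cons f rest ih =>
    intro g1 g2 g3 g4
    rw [List.foldl_cons, pvStepA_classify]
    rcases pvClassify_cases f with h | h | h | h <;>
      simp [h, ih]

-- the open-batch step of B, extracted
def pvInc (bs : Int) (s : List (List (List (String × String))) × List (List (String × String)))
    (f : List (String × String)) : List (List (List (String × String))) × List (List (String × String)) :=
  let cur := s.2 ++ [f]
  if (cur.length : Int) = bs then (s.1 ++ [cur], []) else (s.1, cur)

def pvFlush (s : List (List (List (String × String))) × List (List (String × String))) :
    List (List (List (String × String))) :=
  if s.2 = [] then s.1 else s.1 ++ [s.2]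

theorem pvStepB_eq (bs : Int) (s0 s1 s2 s3 : List (List (List (String × String))) × List (List (String × String)))
    (f : List (String × String)) :
    pvStepB bs [s0, s1, s2, s3] f =
      if pvClassify f = 0 then [pvInc bs s0 f, s1, s2, s3]
      else if pvClassify f = 1 then [s0, pvInc bs s1 f, s2, s3]
      else if pvClassify f = 2 then [s0, s1, pvInc bs s2 f, s3]
      else [s0, s1, s2, pvInc bs s3 f] := by
  rcases pvClassify_cases f with h | h | h | h <;>
    simp [pvStepB, pvInc, h, PySem.List.pyGetD, PySem.List.pyGet?, PySem.List.pyIdx?,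
      PySem.List.pySetD, PySem.List.pySet?]

-- B's single loop factors into one incremental fold per group
theorem pvBfold (bs : Int) (files : List (List (String × String))) :
    ∀ s0 s1 s2 s3, files.foldl (pvStepB bs) [s0, s1, s2, s3] =
      [(files.filter (fun f => pvClassify f == 0)).foldl (pvInc bs) s0,
       (files.filter (fun f => pvClassify f == 1)).foldl (pvInc bs) s1,
       (files.filter (fun f => pvClassify f == 2)).foldl (pvInc bs) s2,
       (files.filter (fun f => pvClassify f == 3)).foldl (pvInc bs) s3] := by
  induction files with
  | nil => intro s0 s1 s2 s3; simp
  | cons f rest ih =>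
    intro s0 s1 s2 s3
    rw [List.foldl_cons, pvStepB_eq]
    rcases pvClassify_cases f with h | h | h | h <;>
      simp [h, ih]

theorem pvCollect4 (p0 p1 p2 p3 : List (List (List (String × String))) × List (List (String × String))) :
    [p0, p1, p2, p3].foldl pvCollect [] =
      pvFlush p0 ++ pvFlush p1 ++ pvFlush p2 ++ pvFlush p3 := by
  simp only [List.foldl_cons, List.foldl_nil, pvCollect, pvFlush]
  split_ifs <;> simp [List.append_assoc]

-- B's incremental batching of one group produces its chunks
theorem pvInc_flush (bs : Int) (hbs : 1 ≤ bs) :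
    ∀ (g : List (List (String × String))) (d : List (List (List (String × String))))
      (c : List (List (String × String))), c.length < bs.toNat →
      pvFlush (g.foldl (pvInc bs) (d, c)) = d ++ pvChunks bs.toNat (c ++ g) := by
  intro g
  induction g with
  | nil =>
    intro d c hc
    rcases eq_or_ne c [] with rfl | hcne
    · simp [pvFlush, pvChunks_nil]
    · simp [pvFlush, hcne, pvChunks_short (by omega : bs.toNat ≠ 0) hcne (by omega)]
  | cons f rest ih =>
    intro d c hc
    rw [List.foldl_cons]
    have hfl : (c ++ [f]).length = c.length + 1 := by simp
    by_cases hfull : (((c ++ [f]).length : Nat) : Int) = bs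
    · have hstep : pvInc bs (d, c) f = (d ++ [c ++ [f]], []) := by
        simp only [pvInc]
        rw [if_pos hfull]
      rw [hstep, ih (d ++ [c ++ [f]]) [] (by simp only [List.length_nil]; omega)]
      have hl : (c ++ [f]).length = bs.toNat := by omega
      have hne : c ++ f :: rest ≠ [] := by simp
      rw [pvChunks_cons (by omega : bs.toNat ≠ 0) hne]
      have hsplit : c ++ f :: rest = (c ++ [f]) ++ rest := by simp
      rw [hsplit, ← hl, List.take_left, List.drop_left]
      simp [List.append_assoc]
    · have hstep : pvInc bs (d, c) f = (d, c ++ [f]) := by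
        simp only [pvInc]
        rw [if_neg hfull]
      rw [hstep, ih d (c ++ [f]) (by omega)]
      simp [List.append_assoc]

-- with a negative batch size a batch is never closed …
theorem pvInc_neg (bs : Int) (hbs : bs < 0) (g : List (List (String × String))) :
    ∀ d c, g.foldl (pvInc bs) (d, c) = (d, c ++ g) := by
  induction g with
  | nil => intro d c; simp
  | cons f rest ih =>
    intro d c
    rw [List.foldl_cons]
    have hstep : pvInc bs (d, c) f = (d, c ++ [f]) := by
      simp only [pvInc]
      rw [if_neg (by omega : ¬ ((((c ++ [f]).length : Nat) : Int) = bs))]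
    rw [hstep, ih]
    simp

-- … and A's slicing loop is a no-op
theorem pvSlice_neg (bs : Int) (hbs : bs < 0) (g : List (List (String × String)))
    (acc : List (List (List (String × String)))) : pvSliceBatches g bs acc = acc := by
  unfold pvSliceBatches
  have hr : PySem.List.pyRange 0 (g.length : Int) bs = [] := by
    unfold PySem.List.pyRange
    rw [if_neg (by omega : ¬ bs = 0)]
    have h1 : ¬ (0:Int) < bs := by omega
    have h2 : ¬ ((g.length : Int) < 0) := by omega
    simp [h1, h2]
  rw [hr, List.foldl_nil]

theorem pvRange_empty_start (bs : Int) : PySem.List.pyRange 0 0 bs = [] := by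
  unfold PySem.List.pyRange
  split_ifs <;> simp_all

-- ===== VERDICT (by name: the statement is the Claim_ definition above) =====
theorem batch_files_by_type_py_spec : Claim_unchanged_batch_files_by_type_py := by
  intro files bs _hdom hpre hnd
  obtain ⟨hbs0, _⟩ := hpre
  unfold D_batch_files_by_type_py at hnd
  rcases eq_or_ne files [] with rfl | hne
  · simp [batch_files_by_type_py, batch_files_by_type_py_alt, pvSliceBatches,
      pvRange_empty_start, pvCollect]
  · have hbs : 1 ≤ bs := by
      by_contra h
      exact hnd ⟨by omega, hne⟩
    unfold batch_files_by_type_py batch_files_by_type_py_alt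
    rw [pvGroups files [] [] [] [], pvBfold bs files, pvCollect4]
    simp only [List.nil_append, List.foldl_cons, List.foldl_nil]
    rw [pvInc_flush bs hbs _ _ _ (by simp only [List.length_nil]; omega), pvInc_flush bs hbs _ _ _ (by simp only [List.length_nil]; omega),
      pvInc_flush bs hbs _ _ _ (by simp only [List.length_nil]; omega), pvInc_flush bs hbs _ _ _ (by simp only [List.length_nil]; omega)]
    rw [pvSliceBatches_eq bs hbs _ _ rfl, pvSliceBatches_eq bs hbs _ _ rfl,
      pvSliceBatches_eq bs hbs _ _ rfl, pvSliceBatches_eq bs hbs _ _ rfl]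
    simp [List.append_assoc]

theorem batch_files_by_type_py_changed : Claim_changed_batch_files_by_type_py := by
  unfold Claim_changed_batch_files_by_type_py; decide

theorem batch_files_by_type_py_tight : Claim_exact_batch_files_by_type_py := by
  intro files bs _hdom _hpre hd
  obtain ⟨hneg, hne⟩ := hd
  have hA : batch_files_by_type_py files bs = [] := by
    unfold batch_files_by_type_py
    simp only [List.foldl_cons, List.foldl_nil]
    rw [pvSlice_neg bs hneg, pvSlice_neg bs hneg, pvSlice_neg bs hneg, pvSlice_neg bs hneg]
  rw [hA]
  intro hB
  have hBval : batch_files_by_type_py_alt files bs =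
      (if files.filter (fun f => pvClassify f == 0) = [] then [] else [files.filter (fun f => pvClassify f == 0)]) ++
      (if files.filter (fun f => pvClassify f == 1) = [] then [] else [files.filter (fun f => pvClassify f == 1)]) ++
      (if files.filter (fun f => pvClassify f == 2) = [] then [] else [files.filter (fun f => pvClassify f == 2)]) ++
      (if files.filter (fun f => pvClassify f == 3) = [] then [] else [files.filter (fun f => pvClassify f == 3)]) := by
    unfold batch_files_by_type_py_alt
    rw [pvBfold bs files, pvCollect4,
      pvInc_neg bs hneg, pvInc_neg bs hneg, pvInc_neg bs hneg, pvInc_neg bs hneg]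
    simp [pvFlush]
  rw [hBval] at hB
  rcases List.exists_cons_of_ne_nil hne with ⟨f, rest, rfl⟩
  have hmem : ∀ k : Int, pvClassify f = k →
      (f :: rest).filter (fun x => pvClassify x == k) ≠ [] := by
    intro k hk
    have hb : (pvClassify f == k) = true := by simp [hk]
    simp [hb]
  have hnil := hB.symm
  rcases List.append_eq_nil_iff.mp hnil with ⟨h3, h4⟩
  rcases List.append_eq_nil_iff.mp h3 with ⟨h5, h6⟩
  rcases List.append_eq_nil_iff.mp h5 with ⟨h7, h8⟩
  rcases pvClassify_cases f with h | h | h | h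
  · have hfk := hmem _ h
    split_ifs at h7 with hcond
    exact hfk hcond
  · have hfk := hmem _ h
    split_ifs at h8 with hcond
    exact hfk hcond
  · have hfk := hmem _ h
    split_ifs at h6 with hcond
    exact hfk hcond
  · have hfk := hmem _ h
    split_ifs at h4 with hcond
    exact hfk hcond
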